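-- pv_equiv track=rewrite | github.com/Rajyavardhan99/PALB1_PYTHON_PROGRAMMING | Maximum_People_Visible_in_a_Line.py | maxPeople
-- ===== SOURCE A (Python) =====
-- def maxPeople(arr):
--     n = len(arr)
--
--     left = [0] * n
--     stack = []
--
--     # LEFT SIDE
--     for i in range(n):
--         count = 0
--         while stack and stack[-1][0] < arr[i]:
--             count += stack[-1][1] + 1
--             stack.pop()
--
--         left[i] = count
--         stack.append((arr[i], count))
--
--     # RIGHT SIDE
--     right = [0] * n
--     stack = []
--
--     for i in range(n - 1, -1, -1):
--         count = 0
--         while stack and stack[-1][0] < arr[i]: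
--             count += stack[-1][1] + 1
--             stack.pop()
--
--         right[i] = count
--         stack.append((arr[i], count))
--
--     # RESULT
--     ans = 0
--     for i in range(n):
--         ans = max(ans, left[i] + right[i] + 1)
--
--     return ans
-- ===== SOURCE B (Python) =====
-- def maxPeople(arr):
--     n = len(arr)
--     ans = 0
--     for i in range(n):
--         l = 0
--         j = i - 1
--         while j >= 0 and arr[j] < arr[i]:
--             l += 1
--             j -= 1
--         r = 0
--         j = i + 1
--         while j < n and arr[j] < arr[i]:
--             r += 1
--             j += 1
--         ans = max(ans, l + r + 1)
--     return ans
-- ===== Notes on version B (the rewrite author's own statement) =====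
-- stated objective: simpler
-- what changed: Replaced the two monotonic-stack passes plus left/right arrays with a direct nested scan: for each index, count strictly-smaller neighbours leftward and rightward until the first >= element; the stack counts telescope to exactly these distances.
import Mathlib
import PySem

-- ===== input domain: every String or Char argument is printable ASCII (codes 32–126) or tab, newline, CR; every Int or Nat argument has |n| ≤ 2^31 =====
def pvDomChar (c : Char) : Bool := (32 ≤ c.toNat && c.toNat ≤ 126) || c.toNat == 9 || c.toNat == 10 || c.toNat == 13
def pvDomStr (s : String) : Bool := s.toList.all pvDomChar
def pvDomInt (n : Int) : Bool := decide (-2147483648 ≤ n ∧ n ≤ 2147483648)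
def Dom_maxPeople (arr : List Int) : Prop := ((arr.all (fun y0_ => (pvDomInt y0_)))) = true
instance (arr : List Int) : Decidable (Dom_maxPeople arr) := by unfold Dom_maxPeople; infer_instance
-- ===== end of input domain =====

-- B replaces A's two monotonic-stack passes by a direct nested left/right scan per index — simpler, not faster.

-- ===== PORT A =====
-- while stack and stack[-1][0] < arr[i]: count += stack[-1][1] + 1; stack.pop()
def popA : List (Int × Int) → Int → Int → Int × List (Int × Int)
  | [], _, count => (count, [])
  | (v, c) :: rest, x, count =>
    if v < x then popA rest x (count + c + 1) else (count, (v, c) :: rest)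

-- loop body of each pass: state = (counts so far, most recent first; stack, top first)
def stepA (st : List Int × List (Int × Int)) (x : Int) : List Int × List (Int × Int) :=
  let p := popA st.2 x 0
  (p.1 :: st.1, (x, p.1) :: p.2)

-- one stack pass ('for i in range(n)'), returning the counts in index order
def passA (arr : List Int) : List Int :=
  (arr.foldl stepA ([], [])).1.reverse

def maxPeople (arr : List Int) : Int :=
  let n : Int := arr.length
  let left := passA arr
  -- the right pass runs i = n-1 … 0, i.e. the same stack loop over the reversed list
  let right := (passA arr.reverse).reverse
  (PySem.List.pyRange 0 n 1).foldl
    (fun ans i => max ans (PySem.List.pyGetD left i 0 + PySem.List.pyGetD right i 0 + 1)) 0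

-- ===== PORT B =====
-- the scan 'while … and arr[j] < arr[i]' as recursion over the neighbour list
def cntB (x : Int) : List Int → Int
  | [] => 0
  | y :: t => if y < x then 1 + cntB x t else 0

-- 'for i in range(n)' as a zipper walk: revPre = arr[:i] reversed, rest = arr[i:]
def goB (revPre : List Int) : List Int → Int → Int
  | [], ans => ans
  | x :: t, ans => goB (x :: revPre) t (max ans (cntB x revPre + cntB x t + 1))

def maxPeople_alt (arr : List Int) : Int := goB [] arr 0

-- ===== PRECONDITION & SPEC =====
def Spec_maxPeople (arr : List Int) (out : Int) : Prop := out = maxPeople_alt arr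
instance (arr : List Int) (out : Int) : Decidable (Spec_maxPeople arr out) := by unfold Spec_maxPeople; infer_instance

-- ===== CLAIM (what is proved, stated in full; the proofs are below) =====
def Claim_equal_maxPeople : Prop := ∀ (arr : List Int), Dom_maxPeople arr → Spec_maxPeople arr (maxPeople arr)

-- ===== LEMMAS AND PROOFS =====

-- total popped count / remaining stack of A's while loop
def popCnt (x : Int) : List (Int × Int) → Int
  | [] => 0
  | (v, c) :: t => if v < x then c + 1 + popCnt x t else 0

def popDrop (x : Int) : List (Int × Int) → List (Int × Int)
  | [] => []
  | (v, c) :: t => if v < x then popDrop x t else (v, c) :: t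

theorem popA_eq (x : Int) : ∀ (st : List (Int × Int)) (c : Int),
    popA st x c = (c + popCnt x st, popDrop x st) := by
  intro st
  induction st with
  | nil => intro c; simp [popA, popCnt, popDrop]
  | cons h t ih =>
    intro c
    obtain ⟨v, k⟩ := h
    by_cases hv : v < x
    · simp [popA, popCnt, popDrop, hv, ih]; ring
    · simp [popA, popCnt, popDrop, hv]

theorem popCnt_split (x y : Int) (hxy : x ≤ y) : ∀ st : List (Int × Int),
    popCnt y st = popCnt x st + popCnt y (popDrop x st) := by
  intro st
  induction st with
  | nil => simp [popCnt, popDrop]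
  | cons h t ih =>
    obtain ⟨v, k⟩ := h
    by_cases hv : v < x
    · have hvy : v < y := lt_of_lt_of_le hv hxy
      simp [popCnt, popDrop, hv, hvy, ih]; ring
    · simp [popCnt, popDrop, hv]

-- the stack invariant: popping for y counts exactly the strictly-smaller run of the reversed prefix
def InvA (stack : List (Int × Int)) (pre : List Int) : Prop :=
  ∀ y : Int, popCnt y stack = cntB y pre

theorem InvA_nil : InvA [] [] := by intro y; simp [popCnt, cntB]

theorem InvA_step {stack : List (Int × Int)} {pre : List Int} (h : InvA stack pre) (x : Int) :
    InvA ((x, popCnt x stack) :: popDrop x stack) (x :: pre) := by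
  intro y
  by_cases hxy : x < y
  · have hs := popCnt_split x y (le_of_lt hxy) stack
    simp [popCnt, cntB, hxy]
    have := h y
    omega
  · simp [popCnt, cntB, hxy]

-- B's left counts, positionally: blL pre l = [cntB l₀ pre, cntB l₁ (l₀::pre), …]
def blL (pre : List Int) : List Int → List Int
  | [] => []
  | x :: t => cntB x pre :: blL (x :: pre) t

-- B's right counts: rrL post l = [cntB l₀ (l₁…++post), …]
def rrL (post : List Int) : List Int → List Int
  | [] => []
  | x :: t => cntB x (t ++ post) :: rrL post t

theorem foldl_stepA : ∀ (l : List Int) (acc : List Int) (stack : List (Int × Int)) (pre : List Int),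
    InvA stack pre → (l.foldl stepA (acc, stack)).1 = (blL pre l).reverse ++ acc := by
  intro l
  induction l with
  | nil => intro acc stack pre _; simp [blL]
  | cons x t ih =>
    intro acc stack pre hinv
    have hstep : stepA (acc, stack) x
        = (popCnt x stack :: acc, (x, popCnt x stack) :: popDrop x stack) := by
      simp [stepA, popA_eq]
    have := ih (popCnt x stack :: acc) ((x, popCnt x stack) :: popDrop x stack) (x :: pre)
        (InvA_step hinv x)
    rw [List.foldl_cons, hstep, this]
    simp [blL, hinv x]

theorem passA_eq (arr : List Int) : passA arr = blL [] arr := by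
  unfold passA
  rw [foldl_stepA arr [] [] [] InvA_nil]
  simp

theorem blL_append : ∀ (a : List Int) (pre b : List Int),
    blL pre (a ++ b) = blL pre a ++ blL (a.reverse ++ pre) b := by
  intro a
  induction a with
  | nil => intro pre b; simp [blL]
  | cons x t ih =>
    intro pre b
    simp only [List.cons_append, blL, ih (x :: pre) b, List.reverse_cons]
    simp

theorem blL_reverse : ∀ (l post : List Int), (blL post l.reverse).reverse = rrL post l := by
  intro l
  induction l with
  | nil => intro post; simp [blL, rrL]
  | cons x t ih =>
    intro post
    simp only [List.reverse_cons, blL_append, blL, rrL]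
    simp [ih post]

theorem length_blL : ∀ (l pre : List Int), (blL pre l).length = l.length := by
  intro l
  induction l with
  | nil => intro pre; simp [blL]
  | cons x t ih => intro pre; simp [blL, ih]

theorem length_rrL (l post : List Int) : (rrL post l).length = l.length := by
  rw [← blL_reverse]; simp [length_blL]

theorem goB_eq : ∀ (l pre : List Int) (ans : Int),
    goB pre l ans
      = (List.zipWith (fun a b => a + b + 1) (blL pre l) (rrL [] l)).foldl max ans := by
  intro l
  induction l with
  | nil => intro pre ans; simp [goB, blL, rrL]
  | cons x t ih =>
    intro pre ans
    simp only [goB, blL, rrL, List.append_nil, List.zipWith_cons_cons, List.foldl_cons]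
    exact ih (x :: pre) (max ans (cntB x pre + cntB x t + 1))

-- ===== VERDICT (by name: the statement is the Claim_ definition above) =====
theorem maxPeople_spec : Claim_equal_maxPeople := by
  intro arr _
  unfold Spec_maxPeople maxPeople maxPeople_alt
  rw [passA_eq arr, passA_eq arr.reverse, blL_reverse]
  set L := blL [] arr with hL
  set R := rrL [] arr with hR
  have hLlen : L.length = arr.length := length_blL arr []
  have hRlen : R.length = arr.length := length_rrL arr []
  set Z := List.zipWith (fun a b => a + b + 1) L R with hZ
  have hZlen : Z.length = arr.length := by
    simp [hZ, hLlen, hRlen]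
  rw [goB_eq]
  have hcongr : (PySem.List.pyRange 0 (arr.length : Int) 1).foldl
      (fun ans i => max ans (PySem.List.pyGetD L i 0 + PySem.List.pyGetD R i 0 + 1)) 0
      = (PySem.List.pyRange 0 ((Z.length : Int)) 1).foldl
      (fun ans i => max ans (PySem.List.pyGetD Z i 0)) 0 := by
    rw [hZlen]
    apply PySem.List.foldl_congr_mem
    intro acc i hi
    have hmem := (PySem.List.mem_pyRange_one).1 hi
    have h0 : 0 ≤ i := hmem.1
    have hn : i < (arr.length : Int) := hmem.2
    have hiZ : i < (Z.length : Int) := by omega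
    have hiL : i < (L.length : Int) := by omega
    have hiR : i < (R.length : Int) := by omega
    rw [PySem.List.pyGetD_eq_getElem Z 0 h0 hiZ,
        PySem.List.pyGetD_eq_getElem L 0 h0 hiL,
        PySem.List.pyGetD_eq_getElem R 0 h0 hiR]
    have hlt : i.toNat < L.length ⊓ R.length := by
      rw [hLlen, hRlen]; simp; omega
    simp [hZ, List.getElem_zipWith]
  rw [hcongr, PySem.List.foldl_pyRange_zero_pyGetD' Z 0 (fun acc z => max acc z) 0]
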